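-- pv_equiv track=rewrite | github.com/johsieders/sandbox | sandbox/stepfunctions/stepfun.py | check_ascending
-- ===== SOURCE A (Python) =====
-- from collections.abc import Sequence, Callable
--
-- def check_ascending(tv_pairs: Sequence) -> tuple:
--     """
--     :param tv_pairs: a sequence of tv-pairs.
--     :return: the given tv-pairs as a tuple.
--     An exception is raised if the time of the tv-pairs are not strictly ascending.
--     """
--     last = None
--     for t, v in tv_pairs:
--         if last is not None and t <= last:
--             raise ValueError()
--         else:
--             last = t
--     return tuple(tv_pairs)
-- ===== SOURCE B (Python) =====
-- def check_ascending(tv_pairs):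
--     times = [t for t, v in tv_pairs]
--     if times != sorted(times) or len(set(times)) != len(times):
--         raise ValueError()
--     return tuple(tv_pairs)
-- ===== Notes on version B (the rewrite author's own statement) =====
-- stated objective: alternative
-- what changed: Replaces A's single-pass comparison against a running 'last' value with an order-theoretic check: times are strictly ascending iff the times list equals its sort and contains no duplicates (len(set(times)) == len(times)); no adjacent comparisons at all.
import Mathlib
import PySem

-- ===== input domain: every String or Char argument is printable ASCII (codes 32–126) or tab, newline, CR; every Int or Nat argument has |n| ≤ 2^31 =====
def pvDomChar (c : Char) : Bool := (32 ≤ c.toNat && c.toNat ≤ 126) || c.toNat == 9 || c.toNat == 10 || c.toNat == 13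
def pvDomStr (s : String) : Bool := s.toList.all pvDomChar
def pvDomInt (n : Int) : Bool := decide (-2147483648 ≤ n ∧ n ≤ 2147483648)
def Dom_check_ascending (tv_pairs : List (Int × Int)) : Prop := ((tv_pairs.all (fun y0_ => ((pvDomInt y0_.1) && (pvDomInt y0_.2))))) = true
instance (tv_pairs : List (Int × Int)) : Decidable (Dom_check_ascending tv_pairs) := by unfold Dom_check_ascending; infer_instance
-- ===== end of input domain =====

-- B replaces A's running-'last' scan with an order-theoretic check:
-- strictly ascending iff times == sorted(times) and len(set(times)) == len(times).

-- ===== PORT A =====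
-- A's loop: state is 'last : Option Int'; the raise path (t ≤ last) is outside Pre_ and yields [].
def checkLoopA : Option Int → List (Int × Int) → Bool
  | _, [] => true
  | last, (t, _v) :: rest =>
    if (match last with | some l => decide (t ≤ l) | none => false) then false
    else checkLoopA (some t) rest

def check_ascending (tv_pairs : List (Int × Int)) : List (Int × Int) :=
  if checkLoopA none tv_pairs then tv_pairs else []

-- ===== PORT B =====
def check_ascending_alt (tv_pairs : List (Int × Int)) : List (Int × Int) :=
  let times := tv_pairs.map (fun p => p.1)
  if times ≠ PySem.List.sorted times (fun x => x) false ∨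
     (PySem.Set.ofList times).length ≠ times.length then []
  else tv_pairs

-- ===== PRECONDITION & SPEC =====
-- Pre_ excludes exactly the inputs on which A raises ValueError (a non-strictly-ascending adjacent time pair).
def Pre_check_ascending (tv_pairs : List (Int × Int)) : Prop :=
  tv_pairs.IsChain (fun a b => a.1 < b.1)
instance (tv_pairs : List (Int × Int)) : Decidable (Pre_check_ascending tv_pairs) := by
  unfold Pre_check_ascending; infer_instance

def pvWitness_check_ascending : (List (Int × Int)) := [(1, 5), (2, -3), (4, 0)]

def Spec_check_ascending (tv_pairs : List (Int × Int)) (out : List (Int × Int)) : Prop := out = check_ascending_alt tv_pairs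
instance (tv_pairs : List (Int × Int)) (out : List (Int × Int)) : Decidable (Spec_check_ascending tv_pairs out) := by unfold Spec_check_ascending; infer_instance

-- ===== CLAIM (what is proved, stated in full; the proofs are below) =====
def Claim_equal_check_ascending : Prop := ∀ (tv_pairs : List (Int × Int)), Dom_check_ascending tv_pairs → Pre_check_ascending tv_pairs → Spec_check_ascending tv_pairs (check_ascending tv_pairs)

-- ===== LEMMAS AND PROOFS =====
lemma checkLoopA_of_chain : ∀ (xs : List (Int × Int)) (l : Int),
    (∀ p ∈ xs.head?, l < p.1) → xs.IsChain (fun a b => a.1 < b.1) →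
    checkLoopA (some l) xs = true := by
  intro xs
  induction xs with
  | nil => intro l _ _; rfl
  | cons p rest ih =>
    intro l hh hc
    have hlt : l < p.1 := hh p rfl
    simp only [checkLoopA, decide_eq_true_eq]
    rw [if_neg (by omega : ¬ p.1 ≤ l)]
    refine ih p.1 ?_ hc.tail
    intro q hq
    cases rest with
    | nil => simp at hq
    | cons r rs =>
      simp only [List.head?] at hq
      cases hq
      exact (List.isChain_cons_cons.mp hc).1

lemma pairwise_map_fst_of_chain : ∀ (xs : List (Int × Int)),
    xs.IsChain (fun a b => a.1 < b.1) →
    (xs.map (fun p => p.1)).Pairwise (· < ·) := by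
  intro xs
  induction xs with
  | nil => intro _; simp
  | cons p rest ih =>
    intro hc
    cases rest with
    | nil => simp
    | cons q rs =>
      have h1 : p.1 < q.1 := (List.isChain_cons_cons.mp hc).1
      have hrest := ih hc.tail
      refine List.pairwise_cons.mpr ⟨?_, hrest⟩
      intro b hb
      simp only [List.map, List.mem_cons] at hb
      show p.1 < b
      rcases hb with hb | hb
      · rw [hb]; exact h1
      · exact lt_trans h1 ((List.pairwise_cons.mp hrest).1 b hb)

lemma ofList_eq_self_of_nodup_aux : ∀ (xs s : List Int),
    (s ++ xs).Nodup → xs.foldl PySem.Set.add s = s ++ xs := by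
  intro xs
  induction xs with
  | nil => intro s _; simp
  | cons x rest ih =>
    intro s h
    have hx : x ∉ s := by
      intro hmem
      have := List.disjoint_of_nodup_append h
      exact this hmem (List.mem_cons_self)
    have hadd : PySem.Set.add s x = s ++ [x] := by
      simp [PySem.Set.add, PySem.Set.contains]
      intro hc
      exact absurd hc hx
    simp only [List.foldl, hadd]
    have := ih (s ++ [x]) (by simpa using h)
    simpa using this

lemma ofList_eq_self_of_nodup (xs : List Int) (h : xs.Nodup) :
    PySem.Set.ofList xs = xs := by
  have := ofList_eq_self_of_nodup_aux xs [] (by simpa using h)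
  simpa [PySem.Set.ofList_eq_foldl] using this

-- ===== VERDICT (by name: the statement is the Claim_ definition above) =====
theorem check_ascending_spec : Claim_equal_check_ascending := by
  intro tv _ hpre
  unfold Spec_check_ascending check_ascending check_ascending_alt
  have hpw : (tv.map (fun p => p.1)).Pairwise (· < ·) := pairwise_map_fst_of_chain tv hpre
  have hsorted : PySem.List.sorted (tv.map (fun p => p.1)) (fun x => x) false = tv.map (fun p => p.1) :=
    PySem.List.sorted_eq_self_of_pairwise _ (fun x => x) (hpw.imp (by intro a b h; exact le_of_lt h))
  have hnodup : (tv.map (fun p => p.1)).Nodup := hpw.imp (by intro a b h; exact ne_of_lt h)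
  have hof : PySem.Set.ofList (tv.map (fun p => p.1)) = tv.map (fun p => p.1) :=
    ofList_eq_self_of_nodup _ hnodup
  have ha : checkLoopA none tv = true := by
    cases tv with
    | nil => rfl
    | cons p rest =>
      simp only [checkLoopA]
      exact checkLoopA_of_chain rest p.1
        (by intro q hq
            cases rest with
            | nil => simp at hq
            | cons r rs =>
              simp only [List.head?] at hq; cases hq
              exact (List.isChain_cons_cons.mp hpre).1)
        hpre.tail
  simp only [ha, if_true, hsorted, hof]
  rw [if_neg]
  simp
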